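-- pv_equiv track=rewrite | github.com/mvienneau/pixel_sort | main.py | sort_bucket_columns
-- ===== SOURCE A (Python) =====
-- THRESHOLD = 25
--
-- SORT_INTENSITY = lambda x: x[0] + x[1] + x[2]
--
-- def compare_bands(p1, p2):
--     r1, g1, b1 = p1
--     r2, g2, b2 = p2
--     if abs(r1 -  r2) > THRESHOLD: # check for a ~10% dif in pixel bands
--         return 1
--     if abs(g1 - g2) > THRESHOLD:
--         return 1
--     if abs(b1 - b2) > THRESHOLD:
--         return 1
--     return 0
--
-- def bucket_column(column):
--     buckets = []
--     start_idx = 0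
--     for i in range(len(column) - 1):
--         cur_pixel = column[i]
--         next_pixel = column[i+1]
--         if compare_bands(cur_pixel, next_pixel):
--             buckets.append((start_idx, i+1))
--             start_idx = i+1
--     buckets.append((start_idx, len(column)))
--     return buckets
--
-- def sort_bucket_columns(column):
--     bucketed_sort_cols = []
--     buckets = bucket_column(column)
--     for b_range in buckets:
--         sort_arr = column[b_range[0]: b_range[1]]
--         sort_arr.sort(key=SORT_INTENSITY)
--         bucketed_sort_cols.append(sort_arr)
--     ret_col = [item for sublist in bucketed_sort_cols for item in sublist]
--     return ret_col
-- ===== SOURCE B (Python) =====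
-- THRESHOLD = 25
--
-- SORT_INTENSITY = lambda x: x[0] + x[1] + x[2]
--
-- def compare_bands(p1, p2):
--     r1, g1, b1 = p1
--     r2, g2, b2 = p2
--     if abs(r1 -  r2) > THRESHOLD:
--         return 1
--     if abs(g1 - g2) > THRESHOLD:
--         return 1
--     if abs(b1 - b2) > THRESHOLD:
--         return 1
--     return 0
--
-- def sort_bucket_columns(column):
--     # single pass: grow the current bucket, flush it (sorted) at each band boundary
--     if not column:
--         return []
--     out = []
--     bucket = [column[0]]
--     prev = column[0]
--     for p in column[1:]:
--         if compare_bands(prev, p):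
--             out.extend(sorted(bucket, key=SORT_INTENSITY))
--             bucket = [p]
--         else:
--             bucket.append(p)
--         prev = p
--     out.extend(sorted(bucket, key=SORT_INTENSITY))
--     return out
-- ===== Notes on version B (the rewrite author's own statement) =====
-- stated objective: simpler
-- what changed: Replaces the two-phase design (build an index-range table with bucket_column, then slice and sort each range) by a single pass that grows the current bucket in place and flushes it sorted at each band boundary; no index arithmetic, no slicing, no intermediate list-of-lists.
import Mathlib
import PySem

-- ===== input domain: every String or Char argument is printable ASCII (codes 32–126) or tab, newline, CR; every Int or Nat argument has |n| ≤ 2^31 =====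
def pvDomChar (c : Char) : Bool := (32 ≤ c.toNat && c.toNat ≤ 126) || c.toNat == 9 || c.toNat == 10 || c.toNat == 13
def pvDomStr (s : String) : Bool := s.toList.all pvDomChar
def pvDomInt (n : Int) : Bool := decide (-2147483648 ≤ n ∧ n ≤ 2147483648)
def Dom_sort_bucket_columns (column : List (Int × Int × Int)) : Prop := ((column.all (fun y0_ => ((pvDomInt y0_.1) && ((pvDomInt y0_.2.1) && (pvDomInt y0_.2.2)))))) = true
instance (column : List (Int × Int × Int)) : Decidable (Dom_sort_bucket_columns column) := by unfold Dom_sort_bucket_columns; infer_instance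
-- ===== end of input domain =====

-- B replaces A's two-phase range-table-then-slice design by a single pass that flushes the
-- current bucket, sorted, at each band boundary (objective: simpler; same asymptotic cost).

-- ===== PORT A =====
def THRESHOLD : Int := 25

def SORT_INTENSITY (x : Int × Int × Int) : Int := x.1 + x.2.1 + x.2.2

def compare_bands (p1 p2 : Int × Int × Int) : Int :=
  if THRESHOLD < |p1.1 - p2.1| then 1
  else if THRESHOLD < |p1.2.1 - p2.2.1| then 1
  else if THRESHOLD < |p1.2.2 - p2.2.2| then 1
  else 0

def bucket_column (column : List (Int × Int × Int)) : List (Int × Int) :=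
  let st := (PySem.List.pyRange 0 ((column.length : Int) - 1) 1).foldl
    (fun (st : List (Int × Int) × Int) i =>
      let cur_pixel := PySem.List.pyGetD column i (0, 0, 0)
      let next_pixel := PySem.List.pyGetD column (i + 1) (0, 0, 0)
      if compare_bands cur_pixel next_pixel ≠ 0 then (st.1 ++ [(st.2, i + 1)], i + 1)
      else st) ([], 0)
  st.1 ++ [(st.2, (column.length : Int))]

def sort_bucket_columns (column : List (Int × Int × Int)) : List (Int × Int × Int) :=
  let buckets := bucket_column column
  let bucketed_sort_cols := buckets.foldl
    (fun (acc : List (List (Int × Int × Int))) b_range =>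
      acc ++ [PySem.List.sorted (PySem.List.slice column (some b_range.1) (some b_range.2)) SORT_INTENSITY])
    []
  bucketed_sort_cols.flatten

-- ===== PORT B =====
-- the loop of Source B: prev pixel, current bucket, remaining pixels; flush sorted bucket at a boundary
def sbc_go (prev : Int × Int × Int) (bucket : List (Int × Int × Int)) (rest : List (Int × Int × Int)) :
    List (Int × Int × Int) :=
  match rest with
  | [] => PySem.List.sorted bucket SORT_INTENSITY
  | p :: rs =>
    if compare_bands prev p ≠ 0 then
      PySem.List.sorted bucket SORT_INTENSITY ++ sbc_go p [p] rs
    else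
      sbc_go p (bucket ++ [p]) rs

def sort_bucket_columns_alt (column : List (Int × Int × Int)) : List (Int × Int × Int) :=
  match column with
  | [] => []
  | c :: rest => sbc_go c [c] rest

-- ===== PRECONDITION & SPEC =====
def Spec_sort_bucket_columns (column : List (Int × Int × Int)) (out : List (Int × Int × Int)) : Prop := out = sort_bucket_columns_alt column
instance (column : List (Int × Int × Int)) (out : List (Int × Int × Int)) : Decidable (Spec_sort_bucket_columns column out) := by unfold Spec_sort_bucket_columns; infer_instance

-- ===== CLAIM (what is proved, stated in full; the proofs are below) =====
def Claim_equal_sort_bucket_columns : Prop := ∀ (column : List (Int × Int × Int)), Dom_sort_bucket_columns column → Spec_sort_bucket_columns column (sort_bucket_columns column)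

-- ===== LEMMAS AND PROOFS =====

-- A's loop body, restated over Nat indices (the fold over pyRange 0 (n-1) 1 visits exactly ↑0..↑(n-2))
def natstep (col : List (Int × Int × Int)) (st : List (Int × Int) × Int) (k : Nat) :
    List (Int × Int) × Int :=
  if compare_bands (col.getD k (0, 0, 0)) (col.getD (k + 1) (0, 0, 0)) ≠ 0
  then (st.1 ++ [(st.2, (k : Int) + 1)], (k : Int) + 1) else st

-- the accumulated bucket list is append-only: a prefix can be pulled out of the fold
theorem natstep_prefix (col : List (Int × Int × Int)) :
    ∀ (ks : List Nat) (bks : List (Int × Int)) (s : Int),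
      ks.foldl (natstep col) (bks, s)
        = (bks ++ (ks.foldl (natstep col) ([], s)).1, (ks.foldl (natstep col) ([], s)).2) := by
  intro ks
  induction ks with
  | nil => intro bks s; simp
  | cons k ks ih =>
    intro bks s
    rw [List.foldl_cons, List.foldl_cons]
    by_cases h : compare_bands (col.getD k (0, 0, 0)) (col.getD (k + 1) (0, 0, 0)) ≠ 0
    · rw [show natstep col (bks, s) k = (bks ++ [(s, (k : Int) + 1)], (k : Int) + 1) from by
          simp only [natstep, if_pos h],
        show natstep col ([], s) k = ([(s, (k : Int) + 1)], (k : Int) + 1) from by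
          simp only [natstep, if_pos h, List.nil_append],
        ih (bks ++ [(s, (k : Int) + 1)]) ((k : Int) + 1),
        ih [(s, (k : Int) + 1)] ((k : Int) + 1)]
      simp
    · rw [show natstep col (bks, s) k = (bks, s) from by simp only [natstep, if_neg h],
        show natstep col ([], s) k = ([], s) from by simp only [natstep, if_neg h]]
      exact ih bks s

-- A's fold over indices k..n-2 starting with bucket start s computes exactly B's loop with
-- prev = col[k], current bucket = col[s:k+1], rest = col[k+1:]
theorem fold_inv (col : List (Int × Int × Int)) :
    ∀ (m k s : Nat), k + m + 1 = col.length → s ≤ k →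
      ((((List.range' k m).foldl (natstep col) ([], (s : Int))).1
          ++ [(((List.range' k m).foldl (natstep col) ([], (s : Int))).2, (col.length : Int))]).map
        (fun ab => PySem.List.sorted (PySem.List.slice col (some ab.1) (some ab.2)) SORT_INTENSITY)).flatten
        = sbc_go (col.getD k (0, 0, 0)) ((col.drop s).take (k + 1 - s)) (col.drop (k + 1)) := by
  intro m
  induction m with
  | zero =>
    intro k s hlen hs
    have hd : col.drop (k + 1) = [] := List.drop_eq_nil_of_le (by omega)
    simp only [List.range', List.foldl_nil, List.nil_append, List.map_cons, List.map_nil,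
      List.flatten_cons, List.flatten_nil, List.append_nil, hd, sbc_go]
    rw [PySem.List.slice_natCast, show col.length - s = k + 1 - s from by omega]
  | succ m ih =>
    intro k s hlen hs
    have hk1 : k + 1 < col.length := by omega
    have hk : k < col.length := by omega
    have hdrop : col.drop (k + 1) = col[k + 1] :: col.drop (k + 2) :=
      List.drop_eq_getElem_cons hk1
    rw [List.range'_succ, List.foldl_cons]
    by_cases h : compare_bands (col.getD k (0, 0, 0)) (col.getD (k + 1) (0, 0, 0)) ≠ 0
    · -- boundary after position k: flush bucket col[s:k+1], restart at k+1
      rw [show natstep col ([], (s : Int)) k = ([((s : Int), (k : Int) + 1)], (k : Int) + 1) from by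
        simp only [natstep, if_pos h, List.nil_append]]
      rw [natstep_prefix col (List.range' (k + 1) m) [((s : Int), (k : Int) + 1)] ((k : Int) + 1)]
      rw [show ((k : Int) + 1) = ((k + 1 : Nat) : Int) from by push_cast; ring]
      rw [List.getD_eq_getElem col _ hk1] at h
      have hIH := ih (k + 1) (k + 1) (by omega) (le_refl _)
      rw [List.getD_eq_getElem col _ hk1, hdrop,
        show k + 1 + 1 - (k + 1) = 1 from by omega,
        show k + 1 + 1 = k + 2 from by omega] at hIH
      rw [show List.take 1 (col[k + 1] :: List.drop (k + 2) col) = [col[k + 1]] from rfl] at hIH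
      simp only [List.map_append, List.map_cons, List.map_nil, List.flatten_append,
        List.flatten_cons, List.flatten_nil, List.append_nil, List.append_assoc] at hIH ⊢
      rw [hIH, hdrop]
      conv_rhs => rw [sbc_go]
      rw [if_pos h, PySem.List.slice_natCast]
    · -- no boundary: col[k+1] joins the current bucket
      rw [show natstep col ([], (s : Int)) k = ([], (s : Int)) from by
        simp only [natstep, if_neg h]]
      rw [ih (k + 1) s (by omega) (by omega)]
      rw [List.getD_eq_getElem col _ hk1] at h ⊢
      have htake : (col.drop s).take (k + 1 - s) ++ [col[k + 1]] = (col.drop s).take (k + 1 + 1 - s) := by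
        have hlt : k + 1 - s < (col.drop s).length := by
          rw [List.length_drop]; omega
        have hel : (col.drop s)[k + 1 - s] = col[k + 1] := by
          rw [List.getElem_drop]
          congr 1; omega
        rw [show k + 1 + 1 - s = (k + 1 - s) + 1 from by omega,
          List.take_succ_eq_append_getElem hlt, hel]
      rw [hdrop]
      conv_rhs => rw [sbc_go]
      rw [if_neg h]
      rw [htake]

-- convert A's pyRange/pyGetD fold into the Nat-indexed fold of natstep (col nonempty)
theorem bucket_column_eq (col : List (Int × Int × Int)) (h : 1 ≤ col.length) :
    bucket_column col
      = ((List.range' 0 (col.length - 1)).foldl (natstep col) ([], 0)).1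
        ++ [(((List.range' 0 (col.length - 1)).foldl (natstep col) ([], 0)).2, (col.length : Int))] := by
  unfold bucket_column
  have hcast : (col.length : Int) - 1 = ((col.length - 1 : Nat) : Int) := by omega
  rw [hcast, PySem.List.pyRange_zero_natCast, List.foldl_map, ← List.range_eq_range']
  rw [List.foldl_ext _ (natstep col) ([], 0) (fun st k _ => by
    simp only [natstep, PySem.List.pyGetD_natCast]
    have hc : ((k : Int) + 1) = ((k + 1 : Nat) : Int) := by push_cast; ring
    rw [hc, PySem.List.pyGetD_natCast])]

-- ===== VERDICT (by name: the statement is the Claim_ definition above) =====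
theorem sort_bucket_columns_spec : Claim_equal_sort_bucket_columns := by
  intro column _
  unfold Spec_sort_bucket_columns
  cases column with
  | nil => decide
  | cons c rest =>
    unfold sort_bucket_columns
    dsimp only
    rw [PySem.List.foldl_append_singleton_eq_map]
    rw [bucket_column_eq (c :: rest) (by simp)]
    have h := fold_inv (c :: rest) ((c :: rest).length - 1) 0 0 (by simp) (le_refl 0)
    simp only [Nat.cast_zero, Nat.zero_add] at h
    rw [List.nil_append, h]
    simp [sort_bucket_columns_alt]
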